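-- pv_equiv track=rewrite | github.com/Smokierpizza17/AdventOfCode | (14) dockingData/part1.py | applyBitmask
-- ===== SOURCE A (Python) =====
-- def applyBitmask(bitMask, bitStr):
--     '''returns bitStr with bitmask applied'''
--     maskMap = {}
--     for index, value in enumerate(bitMask):
--         if value != "X":
--             maskMap[index] = value
--
--     outStr = list(bitStr)
--     for index, value in enumerate(bitStr):
--         if index in maskMap.keys():
--             outStr[index] = maskMap[index]
--     return "".join(outStr)
-- ===== SOURCE B (Python) =====
-- def applyBitmask(bitMask, bitStr):
--     '''returns bitStr with bitmask applied'''
--     head = "".join(c if m == "X" else m for m, c in zip(bitMask, bitStr))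
--     return head + bitStr[len(bitMask):]
-- ===== Notes on version B (the rewrite author's own statement) =====
-- stated objective: simpler
-- what changed: B replaces A's build-an-index-dict-then-rewrite-a-char-list scheme by a zip of mask and string producing the masked prefix, concatenated with the untouched suffix of bitStr beyond the mask's length.
import Mathlib
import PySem

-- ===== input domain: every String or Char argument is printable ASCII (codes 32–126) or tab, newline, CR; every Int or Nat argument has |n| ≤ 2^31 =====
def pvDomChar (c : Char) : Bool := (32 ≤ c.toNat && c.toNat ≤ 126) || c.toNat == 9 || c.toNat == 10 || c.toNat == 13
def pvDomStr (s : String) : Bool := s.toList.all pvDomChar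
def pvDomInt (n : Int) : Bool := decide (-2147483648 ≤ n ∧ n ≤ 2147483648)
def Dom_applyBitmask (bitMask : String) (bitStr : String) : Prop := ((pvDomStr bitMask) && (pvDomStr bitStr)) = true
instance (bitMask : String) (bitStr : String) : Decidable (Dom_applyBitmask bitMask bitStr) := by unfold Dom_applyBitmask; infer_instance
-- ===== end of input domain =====

-- B replaces A's build-a-dict-then-rewrite-a-list scheme by zip(mask, str) for the masked prefix plus the untouched suffix of bitStr (simpler; same cost).


-- ===== PORT A =====
-- first loop: maskMap[index] = value for every non-'X' mask character
def pvBuildStep (d : PySem.Dict Int Char) (iv : Int × Char) : PySem.Dict Int Char :=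
  if iv.2 ≠ 'X' then d.insert iv.1 iv.2 else d

-- second loop: outStr[index] = maskMap[index] whenever 'index in maskMap.keys()'
def pvSetStep (g : Int → Option Char) (out : List Char) (iv : Int × Char) : List Char :=
  match g iv.1 with
  | some v => PySem.List.pySetD out iv.1 v
  | none => out

def applyBitmask (bitMask : String) (bitStr : String) : String :=
  let maskMap := (PySem.List.enumerate bitMask.toList).foldl pvBuildStep PySem.Dict.empty
  let outStr := bitStr.toList
  let outStr := (PySem.List.enumerate bitStr.toList).foldl (pvSetStep maskMap.get?) outStr
  String.ofList outStr

-- ===== PORT B =====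
-- zip truncates to the shorter operand, exactly as Python's zip; bitStr[len(bitMask):]
-- with a nonnegative start is exactly List.drop.
def applyBitmask_alt (bitMask : String) (bitStr : String) : String :=
  let head := (bitMask.toList.zip bitStr.toList).map
    (fun mc => if mc.1 = 'X' then mc.2 else mc.1)
  String.ofList (head ++ bitStr.toList.drop bitMask.toList.length)

-- ===== PRECONDITION & SPEC =====
def Spec_applyBitmask (bitMask : String) (bitStr : String) (out : String) : Prop := out = applyBitmask_alt bitMask bitStr
instance (bitMask : String) (bitStr : String) (out : String) : Decidable (Spec_applyBitmask bitMask bitStr out) := by unfold Spec_applyBitmask; infer_instance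

-- ===== CLAIM (what is proved, stated in full; the proofs are below) =====
def Claim_equal_applyBitmask : Prop := ∀ (bitMask : String) (bitStr : String), Dom_applyBitmask bitMask bitStr → Spec_applyBitmask bitMask bitStr (applyBitmask bitMask bitStr)

-- ===== LEMMAS AND PROOFS =====

-- dict of the first loop, key absent from the processed pairs: lookup falls through to the accumulator
lemma build_get_notin (l : List (Int × Char)) (d0 : PySem.Dict Int Char) (j : Int)
    (hj : j ∉ l.map (·.1)) :
    (l.foldl pvBuildStep d0).get? j = d0.get? j := by
  induction l generalizing d0 with
  | nil => rfl
  | cons p l ih =>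
    simp only [List.map_cons, List.mem_cons, not_or] at hj
    simp only [List.foldl_cons]
    rw [ih _ hj.2]
    unfold pvBuildStep
    split
    · exact PySem.Dict.get?_insert_of_ne _ _ hj.1
    · rfl

-- dict of the first loop, key present (indices strictly increasing): lookup finds the pair's char unless it is 'X'
lemma build_get_mem (l : List (Int × Char)) (d0 : PySem.Dict Int Char) (j : Int) (c : Char)
    (hnd : (l.map (·.1)).Pairwise (· < ·)) (hmem : (j, c) ∈ l) :
    (l.foldl pvBuildStep d0).get? j = if c ≠ 'X' then some c else d0.get? j := by
  induction l generalizing d0 with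
  | nil => cases hmem
  | cons p l ih =>
    simp only [List.map_cons, List.pairwise_cons] at hnd
    rcases List.mem_cons.mp hmem with h | h
    · subst h
      have hnotin : j ∉ l.map (·.1) := fun hm => lt_irrefl j (hnd.1 j hm)
      simp only [List.foldl_cons]
      rw [build_get_notin l _ j hnotin]
      unfold pvBuildStep
      by_cases hc : c = 'X'
      · simp [hc]
      · simp [hc, PySem.Dict.get?_insert_self]
    · have hne : j ≠ p.1 := by
        intro he
        have : p.1 < j := hnd.1 j (List.mem_map.mpr ⟨(j, c), h, rfl⟩)
        omega
      simp only [List.foldl_cons]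
      rw [ih _ hnd.2 h]
      have hstep : (pvBuildStep d0 p).get? j = d0.get? j := by
        unfold pvBuildStep
        split
        · exact PySem.Dict.get?_insert_of_ne _ _ hne
        · rfl
      rw [hstep]

-- the second loop preserves the list length
lemma setF_length (g : Int → Option Char) (l : List (Int × Char)) (out : List Char) :
    (l.foldl (pvSetStep g) out).length = out.length := by
  induction l generalizing out with
  | nil => rfl
  | cons p l ih =>
    simp only [List.foldl_cons]
    rw [ih]
    unfold pvSetStep
    split
    · exact PySem.List.length_pySetD ..
    · rfl

-- pointwise value of the second loop (indices strictly increasing, nonnegative and in range)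
lemma setF_getElem? (g : Int → Option Char) (l : List (Int × Char)) (out : List Char) (j : Nat)
    (hnd : (l.map (·.1)).Pairwise (· < ·))
    (hrange : ∀ p ∈ l, 0 ≤ p.1 ∧ p.1.toNat < out.length) :
    (l.foldl (pvSetStep g) out)[j]? =
      if (j : Int) ∈ l.map (·.1) then
        match g (j : Int) with
        | some v => some v
        | none => out[j]?
      else out[j]? := by
  induction l generalizing out with
  | nil => simp
  | cons p l ih =>
    obtain ⟨pi, pc⟩ := p
    simp only [List.map_cons, List.pairwise_cons] at hnd
    obtain ⟨hp0, hplen⟩ := hrange _ (List.mem_cons_self ..)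
    simp only at hp0 hplen
    have hlenstep : (pvSetStep g out (pi, pc)).length = out.length := by
      unfold pvSetStep
      split
      · exact PySem.List.length_pySetD ..
      · rfl
    have hrange' : ∀ q ∈ l, 0 ≤ q.1 ∧ q.1.toNat < (pvSetStep g out (pi, pc)).length := by
      intro q hq
      rw [hlenstep]
      exact hrange q (List.mem_cons_of_mem _ hq)
    simp only [List.foldl_cons]
    rw [ih _ hnd.2 hrange']
    by_cases hjp : (j : Int) = pi
    · subst hjp
      have hjlen : j < out.length := by omega
      have hnotin : ((j : Nat) : Int) ∉ l.map (·.1) := by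
        intro hm
        exact lt_irrefl _ (hnd.1 _ hm)
      rw [if_neg hnotin, List.map_cons, if_pos (List.mem_cons_self ..)]
      unfold pvSetStep
      cases hg : g (j : Int) with
      | some v =>
        simp only [PySem.List.pySetD_natCast]
        exact List.getElem?_set_self hjlen
      | none => rfl
    · have hout : (pvSetStep g out (pi, pc))[j]? = out[j]? := by
        unfold pvSetStep
        cases hg : g pi with
        | some v =>
          simp only
          rw [PySem.List.pySetD_of_nonneg _ _ hp0]
          exact List.getElem?_set_ne (by omega)
        | none => rfl
      by_cases hmem : (j : Int) ∈ l.map (·.1)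
      · rw [if_pos hmem, List.map_cons, if_pos (List.mem_cons_of_mem _ hmem)]
        cases hg : g (j : Int) with
        | some v => rfl
        | none => exact hout
      · rw [if_neg hmem, List.map_cons, if_neg (by simp [hjp, hmem]), hout]

-- main equality, proved pointwise on the underlying character lists
lemma applyBitmask_eq_alt (bitMask bitStr : String) :
    applyBitmask bitMask bitStr = applyBitmask_alt bitMask bitStr := by
  unfold applyBitmask applyBitmask_alt
  apply congrArg String.ofList
  set a := bitMask.toList with ha
  set s := bitStr.toList with hs
  set d := (PySem.List.enumerate a).foldl pvBuildStep PySem.Dict.empty with hd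
  have hdget : ∀ j : Nat, d.get? (j : Int) =
      if h : j < a.length then (if a[j] ≠ 'X' then some a[j] else none) else none := by
    intro j
    by_cases h : j < a.length
    · have hmem : ((j : Int), a[j]) ∈ PySem.List.enumerate a := by
        rw [PySem.List.mem_enumerate_iff]
        exact ⟨j, h, by simp⟩
      rw [hd, build_get_mem _ _ _ _ (List.pairwise_map.mpr (PySem.List.pairwise_lt_enumerate ..)) hmem]
      by_cases hx : a[j] = 'X' <;> simp [h, hx, PySem.Dict.get?_empty]
    · have hnotin : (j : Int) ∉ (PySem.List.enumerate a).map (·.1) := by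
        intro hm
        obtain ⟨p, hp, hfst⟩ := List.mem_map.mp hm
        rw [PySem.List.mem_enumerate_iff] at hp
        obtain ⟨k, hk, rfl⟩ := hp
        simp only [zero_add] at hfst
        have : j = k := by exact_mod_cast hfst.symm
        omega
      rw [hd, build_get_notin _ _ _ hnotin]
      simp [h, PySem.Dict.get?_empty]
  have hheadlen : ((a.zip s).map (fun mc => if mc.1 = 'X' then mc.2 else mc.1)).length
      = min a.length s.length := by
    simp
  apply List.ext_getElem?
  intro j
  by_cases hj : j < s.length
  · rw [setF_getElem? _ _ _ _ (List.pairwise_map.mpr (PySem.List.pairwise_lt_enumerate ..)) ?_]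
    · have hmemf : (j : Int) ∈ (PySem.List.enumerate s).map (·.1) := by
        refine List.mem_map.mpr ⟨((j : Int), s[j]), ?_, rfl⟩
        rw [PySem.List.mem_enumerate_iff]
        exact ⟨j, hj, by simp⟩
      rw [if_pos hmemf, hdget j]
      by_cases hm : j < a.length
      · have hjmin : j < min a.length s.length := by omega
        rw [List.getElem?_append_left (by rw [hheadlen]; exact hjmin)]
        have hz : ((a.zip s).map (fun mc => if mc.1 = 'X' then mc.2 else mc.1))[j]? =
            some (if a[j] = 'X' then s[j] else a[j]) := by
          have hzl : j < (a.zip s).length := by simp; omega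
          rw [List.getElem?_map, List.getElem?_eq_getElem hzl]
          simp [List.getElem_zip]
        rw [hz]
        simp only [dif_pos hm]
        by_cases hx : a[j] = 'X' <;> simp [hx]
      · have hle : a.length ≤ s.length := by omega
        rw [List.getElem?_append_right (by rw [hheadlen]; omega)]
        simp only [dif_neg hm, hheadlen]
        rw [List.getElem?_drop]
        congr 1
        omega
    · intro p hp
      rw [PySem.List.mem_enumerate_iff] at hp
      obtain ⟨k, hk, rfl⟩ := hp
      refine ⟨by simp, by simp; omega⟩
  · rw [List.getElem?_eq_none (le_of_not_gt (by rw [setF_length]; omega)),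
      List.getElem?_eq_none (le_of_not_gt (by
        rw [List.length_append, hheadlen, List.length_drop]; omega))]

-- ===== VERDICT (by name: the statement is the Claim_ definition above) =====
theorem applyBitmask_spec : Claim_equal_applyBitmask := by
  intro bitMask bitStr _
  exact applyBitmask_eq_alt bitMask bitStr
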